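-- pv_equiv track=rewrite | github.com/ranwang0410/LeetHub | 0697-degree-of-an-array/0697-degree-of-an-array.py | findShortestSubArray
-- ===== SOURCE A (Python) =====
-- def findShortestSubArray(nums):
--     """
--     :type nums: List[int]
--     :rtype: int
--     """
--     count = {}
--     idx = {}
--
--     for i, num in enumerate(nums):
--         if num not in count:
--             count[num]=1
--             idx[num] = [i, i]
--         else:
--             count[num]+=1
--             idx[num][1] = i
--
--
--     deg = max(count.values())
--
--
--     listOfKeys = [key for (key, value) in count.items() if value==deg]
--
--     ln=len(nums)
--
--     for key in listOfKeys:
--         lb=idx[key][0]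
--         ub=idx[key][1]
--         ln = min(ln, ub-lb+1)
--
--     return ln
-- ===== SOURCE B (Python) =====
-- def findShortestSubArray(nums):
--     """
--     :type nums: List[int]
--     :rtype: int
--     """
--     first = {}
--     count = {}
--     degree = 0
--     ans = 0
--     for i, num in enumerate(nums):
--         if num not in first:
--             first[num] = i
--         c = count.get(num, 0) + 1
--         count[num] = c
--         if c > degree:
--             degree = c
--             ans = i - first[num] + 1
--         elif c == degree:
--             ans = min(ans, i - first[num] + 1)
--     return ans
-- ===== Notes on version B (the rewrite author's own statement) =====
-- stated objective: alternative
-- what changed: A builds a count dict and an index-pair dict, then separately takes max of counts, filters the max-degree keys and loops over them minimizing spans; B computes the answer in a single enumerate pass that maintains first-occurrence indices, running counts, the current degree and the current best length, with no post-pass.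
import Mathlib
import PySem

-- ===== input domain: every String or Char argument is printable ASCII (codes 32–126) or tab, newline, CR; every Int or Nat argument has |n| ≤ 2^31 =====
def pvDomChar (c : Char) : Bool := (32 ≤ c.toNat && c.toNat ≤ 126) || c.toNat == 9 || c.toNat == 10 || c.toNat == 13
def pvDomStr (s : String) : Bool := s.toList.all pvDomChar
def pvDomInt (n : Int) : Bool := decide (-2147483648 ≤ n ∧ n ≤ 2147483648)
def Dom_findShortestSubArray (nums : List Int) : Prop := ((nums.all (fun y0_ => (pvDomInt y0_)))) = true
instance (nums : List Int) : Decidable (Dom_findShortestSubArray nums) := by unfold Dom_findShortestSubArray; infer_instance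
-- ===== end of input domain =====

-- B replaces A's two-dict build followed by a separate max, key filter and span loop with a
-- single pass that maintains the running degree and best window length (objective: alternative).
-- On the empty list A raises ValueError (max() of no values); Pre_ excludes it, B returns 0 there.

-- ===== PORT A =====
def aStep (st : PySem.Dict Int Int × PySem.Dict Int (Int × Int)) (p : Int × Int) :
    PySem.Dict Int Int × PySem.Dict Int (Int × Int) :=
  if st.1.contains p.2 = false then
    (st.1.insert p.2 1, st.2.insert p.2 (p.1, p.1))
  else
    (st.1.modify p.2 0 (· + 1), st.2.modify p.2 (0, 0) (fun q => (q.1, p.1)))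

def findShortestSubArray (nums : List Int) : Int :=
  let st := (PySem.List.enumerate nums 0).foldl aStep (PySem.Dict.empty, PySem.Dict.empty)
  match PySem.List.max? st.1.values (fun v => v) with
  | none => 0
  | some deg =>
    let listOfKeys := (st.1.items.filter (fun kv => kv.2 == deg)).map (fun kv => kv.1)
    listOfKeys.foldl
      (fun ln key =>
        min ln ((st.2.getD key (0, 0)).2 - (st.2.getD key (0, 0)).1 + 1))
      (nums.length : Int)


-- ===== PORT B =====
def bStep (st : PySem.Dict Int Int × PySem.Dict Int Int × Int × Int) (p : Int × Int) :
    PySem.Dict Int Int × PySem.Dict Int Int × Int × Int :=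
  let first := if st.1.contains p.2 = false then st.1.insert p.2 p.1 else st.1
  let c := st.2.1.getD p.2 0 + 1
  let count := st.2.1.insert p.2 c
  if st.2.2.1 < c then (first, count, c, p.1 - first.getD p.2 0 + 1)
  else if c = st.2.2.1 then
    (first, count, st.2.2.1, min st.2.2.2 (p.1 - first.getD p.2 0 + 1))
  else (first, count, st.2.2.1, st.2.2.2)

def findShortestSubArray_alt (nums : List Int) : Int :=
  ((PySem.List.enumerate nums 0).foldl bStep
    (PySem.Dict.empty, PySem.Dict.empty, 0, 0)).2.2.2

-- ===== PRECONDITION & SPEC =====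
-- Pre_ excludes only the empty list, on which A raises ValueError (max() of an empty sequence).
def Pre_findShortestSubArray (nums : List Int) : Prop := nums ≠ []
instance (nums : List Int) : Decidable (Pre_findShortestSubArray nums) := by
  unfold Pre_findShortestSubArray; infer_instance
def pvWitness_findShortestSubArray : List Int := [1, 2, 2, 3, 1]

def Spec_findShortestSubArray (nums : List Int) (out : Int) : Prop := out = findShortestSubArray_alt nums
instance (nums : List Int) (out : Int) : Decidable (Spec_findShortestSubArray nums out) := by unfold Spec_findShortestSubArray; infer_instance

-- ===== CLAIM (what is proved, stated in full; the proofs are below) =====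
def Claim_equal_findShortestSubArray : Prop := ∀ (nums : List Int), Dom_findShortestSubArray nums → Pre_findShortestSubArray nums → Spec_findShortestSubArray nums (findShortestSubArray nums)

-- ===== LEMMAS AND PROOFS =====

-- The shared model: one entry (value, count, first index, last index) per distinct value, in
-- first-occurrence order; both folds are images of one model update `updM` on this list.
def updM : List (Int × Int × Int × Int) → Int → Int → List (Int × Int × Int × Int)
  | [], i, num => [(num, 1, i, i)]
  | e :: r, i, num =>
    if e.1 = num then (num, e.2.1 + 1, e.2.2.1, i) :: r else e :: updM r i num
def cOf : List (Int × Int × Int × Int) → Int → Int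
  | [], _ => 0
  | e :: r, num => if e.1 = num then e.2.1 else cOf r num
def fOf : List (Int × Int × Int × Int) → Int → Int → Int
  | [], i, _ => i
  | e :: r, i, num => if e.1 = num then e.2.2.1 else fOf r i num
def degM (m : List (Int × Int × Int × Int)) : Int := (m.map fun e => e.2.1).foldl max 0

theorem foldl_max_acc : ∀ (t : List Int) (a b : Int), t.foldl max (max a b) = max (t.foldl max a) b
  | [], _, _ => rfl
  | x :: t, a, b => by
    simp only [List.foldl_cons]
    rw [show max (max a b) x = max (max a x) b by omega]
    exact foldl_max_acc t (max a x) b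

theorem degM_cons (e : Int × Int × Int × Int) (r : List (Int × Int × Int × Int)) :
    degM (e :: r) = max e.2.1 (degM r) := by
  simp only [degM, List.map_cons, List.foldl_cons]
  rw [show max (0:Int) e.2.1 = max 0 e.2.1 from rfl, foldl_max_acc]
  omega

theorem le_degM (m : List (Int × Int × Int × Int)) : ∀ e ∈ m, e.2.1 ≤ degM m := by
  induction m with
  | nil => simp
  | cons e r ih =>
    intro e' he'
    rw [degM_cons]
    rcases List.mem_cons.mp he' with h | h
    · subst h; omega
    · have := ih e' h; omega

theorem degM_updM (m : List (Int × Int × Int × Int)) (i num : Int) :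
    degM (updM m i num) = max (degM m) (cOf m num + 1) := by
  induction m with
  | nil => simp [updM, cOf, degM]
  | cons e r ih =>
    by_cases h : e.1 = num
    · simp only [updM, cOf, if_pos h, degM_cons]; omega
    · simp only [updM, cOf, if_neg h, degM_cons, ih]; omega

theorem filter_updM_insert (m : List (Int × Int × Int × Int)) (i num d : Int)
    (hd : d = cOf m num + 1) :
    ∃ l1 l2, m.filter (fun e => e.2.1 == d) = l1 ++ l2 ∧
      (updM m i num).filter (fun e => e.2.1 == d) =
        l1 ++ (num, cOf m num + 1, fOf m i num, i) :: l2 := by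
  induction m with
  | nil =>
    refine ⟨[], [], by simp, ?_⟩
    simp [updM, cOf, fOf] at hd ⊢
    omega
  | cons e r ih =>
    by_cases h : e.1 = num
    · refine ⟨[], r.filter (fun e => e.2.1 == d), ?_, ?_⟩
      · simp only [cOf, if_pos h] at hd
        simp [List.filter_cons, show (e.2.1 == d) = false by simp; omega]
      · simp only [cOf, if_pos h] at hd
        simp [updM, if_pos h, List.filter_cons, cOf, fOf, if_pos h, hd]
    · simp only [cOf, if_neg h] at hd
      obtain ⟨l1, l2, h1, h2⟩ := ih hd
      by_cases he : (e.2.1 == d) = true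
      · refine ⟨e :: l1, l2, ?_, ?_⟩
        · simp [List.filter_cons, he, h1]
        · simp [updM, if_neg h, List.filter_cons, he, h2, cOf, fOf, if_neg h]
      · refine ⟨l1, l2, ?_, ?_⟩
        · simp [List.filter_cons, he, h1]
        · simp only [updM, if_neg h]
          simp [List.filter_cons, he, h2, cOf, fOf, if_neg h]

theorem filter_updM_ne (m : List (Int × Int × Int × Int)) (i num d : Int)
    (h1 : cOf m num + 1 ≠ d) (h2 : cOf m num ≠ d) :
    (updM m i num).filter (fun e => e.2.1 == d) = m.filter (fun e => e.2.1 == d) := by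
  induction m with
  | nil =>
    simp [cOf] at h1
    simp [updM, List.filter_cons, show ((1:Int) == d) = false by simp; omega]
  | cons e r ih =>
    by_cases h : e.1 = num
    · simp only [cOf, if_pos h] at h1 h2
      simp [updM, if_pos h, List.filter_cons, show (e.2.1 + 1 == d) = false by simp; omega,
        show (e.2.1 == d) = false by simp; omega]
    · simp only [cOf, if_neg h] at h1 h2
      simp [updM, if_neg h, List.filter_cons, ih h1 h2]

theorem degM_mem (m : List (Int × Int × Int × Int)) (hm : m ≠ [])
    (hc : ∀ e ∈ m, 1 ≤ e.2.1) : ∃ e ∈ m, e.2.1 = degM m := by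
  induction m with
  | nil => exact absurd rfl hm
  | cons e r ih =>
    by_cases hr : r = []
    · subst hr
      refine ⟨e, by simp, ?_⟩
      have := hc e (by simp)
      rw [degM_cons]; simp [degM]; omega
    · obtain ⟨e', he', hd⟩ := ih hr (fun x hx => hc x (List.mem_cons_of_mem e hx))
      rw [degM_cons]
      have h1 := hc e (by simp)
      by_cases hle : e.2.1 ≤ degM r
      · exact ⟨e', List.mem_cons_of_mem e he', by omega⟩
      · exact ⟨e, by simp, by omega⟩

def minWith : List Int → Int
  | [] => 0
  | x :: t => t.foldl min x

theorem foldl_min_acc : ∀ (t : List Int) (a b : Int), t.foldl min (min a b) = min (t.foldl min a) b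
  | [], _, _ => rfl
  | x :: t, a, b => by
    simp only [List.foldl_cons]
    rw [show min (min a b) x = min (min a x) b by omega]
    exact foldl_min_acc t (min a x) b

theorem foldl_min_insert : ∀ (l1 : List Int) (a x : Int) (l2 : List Int),
    (l1 ++ x :: l2).foldl min a = min ((l1 ++ l2).foldl min a) x
  | [], a, x, l2 => by simp only [List.nil_append, List.foldl_cons]; exact foldl_min_acc l2 a x
  | y :: l1, a, x, l2 => by
    simp only [List.cons_append, List.foldl_cons]; exact foldl_min_insert l1 (min a y) x l2

theorem minWith_insert (l1 l2 : List Int) (x : Int) (h : l1 ++ l2 ≠ []) :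
    minWith (l1 ++ x :: l2) = min (minWith (l1 ++ l2)) x := by
  cases l1 with
  | nil =>
    cases l2 with
    | nil => exact absurd rfl h
    | cons y t =>
      simp only [List.nil_append, minWith, List.foldl_cons]
      rw [show min x y = min y x by omega]
      exact foldl_min_acc t y x
  | cons a r =>
    simp only [List.cons_append, minWith]
    exact foldl_min_insert r a x l2

theorem keys_updM (m : List (Int × Int × Int × Int)) (i num : Int) :
    (updM m i num).map (·.1) =
      if num ∈ m.map (·.1) then m.map (·.1) else m.map (·.1) ++ [num] := by
  induction m with
  | nil => simp [updM]
  | cons e r ih =>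
    by_cases h : e.1 = num
    · simp [updM, if_pos h, h]
    · by_cases hm : num ∈ r.map (·.1)
      · simp [updM, if_neg h, ih, hm, Ne.symm h]
      · simp [updM, if_neg h, ih, hm, Ne.symm h]

theorem updM_not_mem (m : List (Int × Int × Int × Int)) (i num : Int)
    (h : num ∉ m.map (·.1)) : updM m i num = m ++ [(num, 1, i, i)] := by
  induction m with
  | nil => simp [updM]
  | cons e r ih =>
    simp only [List.map_cons, List.mem_cons] at h
    push_neg at h
    simp [updM, if_neg (fun he : e.1 = num => h.1 he.symm), ih h.2]


def Good (m : List (Int × Int × Int × Int)) (s : Int) : Prop :=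
  (m.map (·.1)).Nodup ∧ 0 ≤ s ∧
    ∀ e ∈ m, 1 ≤ e.2.1 ∧ 0 ≤ e.2.2.1 ∧ e.2.2.1 ≤ e.2.2.2 ∧ e.2.2.2 < s

theorem good_updM (m : List (Int × Int × Int × Int)) (s num : Int) (hg : Good m s) :
    Good (updM m s num) (s + 1) := by
  obtain ⟨hnd, hs, hb⟩ := hg
  refine ⟨?_, by omega, ?_⟩
  · rw [keys_updM]
    split
    · exact hnd
    · next hm =>
        simp [List.nodup_append, hnd]
        intro a b c d hmem ha
        exact hm (ha ▸ List.mem_map_of_mem hmem)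
  · intro e he
    induction m with
    | nil =>
      simp [updM] at he
      subst he; simp; omega
    | cons a r ih =>
      by_cases h : a.1 = num
      · simp only [updM, if_pos h, List.mem_cons] at he
        rcases he with he | he
        · have := hb a (by simp)
          subst he; simp at *; omega
        · have := hb e (List.mem_cons_of_mem a he); omega
      · simp only [updM, if_neg h, List.mem_cons] at he
        rcases he with he | he
        · have := hb a (by simp); subst he; omega
        · exact ih (by simp at hnd ⊢; exact hnd.2) (fun x hx => hb x (List.mem_cons_of_mem a hx)) he

def cntD (m : List (Int × Int × Int × Int)) : PySem.Dict Int Int :=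
  PySem.Dict.mk (m.map fun e => (e.1, e.2.1))
def idxD (m : List (Int × Int × Int × Int)) : PySem.Dict Int (Int × Int) :=
  PySem.Dict.mk (m.map fun e => (e.1, e.2.2))
def fstD (m : List (Int × Int × Int × Int)) : PySem.Dict Int Int :=
  PySem.Dict.mk (m.map fun e => (e.1, e.2.2.1))

theorem contains_mapD {ν : Type} (m : List (Int × Int × Int × Int)) (num : Int)
    (vf : Int × Int × Int × Int → ν) :
    (PySem.Dict.mk (m.map fun e => (e.1, vf e))).contains num =
      decide (num ∈ m.map (·.1)) := by
  simp only [PySem.Dict.contains, PySem.Dict.items, List.any_map]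
  induction m with
  | nil => simp
  | cons e r ih =>
    by_cases h : e.1 = num
    · simp [h, Function.comp]
    · simp only [List.any_cons, ih, List.map_cons, List.mem_cons]
      simp [Function.comp, h, Ne.symm h]

theorem cOf_not_mem (m : List (Int × Int × Int × Int)) (num : Int)
    (h : num ∉ m.map (·.1)) : cOf m num = 0 := by
  induction m with
  | nil => rfl
  | cons e r ih =>
    simp only [List.map_cons, List.mem_cons] at h
    push_neg at h
    simp [cOf, if_neg (fun he : e.1 = num => h.1 he.symm), ih h.2]

theorem getD_cntD (m : List (Int × Int × Int × Int)) (num : Int) :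
    (cntD m).getD num 0 = cOf m num := by
  simp only [cntD, PySem.Dict.getD, PySem.Dict.get?, PySem.Dict.items]
  induction m with
  | nil => rfl
  | cons e r ih =>
    by_cases h : e.1 = num
    · simp only [List.map_cons, List.find?_cons,
        show ((e.1, e.2.1).1 == num) = true from by simpa using h, cond_true]
      simp [cOf, h]
    · simp only [List.map_cons, List.find?_cons,
        show ((e.1, e.2.1).1 == num) = false from by simpa using h, cond_false]
      rw [ih]; simp [cOf, h]

theorem getD_fstD_fOf (m : List (Int × Int × Int × Int)) (i num : Int)
    (h : num ∈ m.map (·.1)) : (fstD m).getD num i = fOf m i num := by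
  simp only [fstD, PySem.Dict.getD, PySem.Dict.get?, PySem.Dict.items]
  induction m with
  | nil => simp at h
  | cons e r ih =>
    by_cases he : e.1 = num
    · simp only [List.map_cons, List.find?_cons,
        show ((e.1, e.2.2.1).1 == num) = true from by simpa using he, cond_true]
      simp [fOf, he]
    · simp only [List.map_cons, List.mem_cons] at h
      rcases h with h | h
      · exact absurd h.symm he
      · simp only [List.map_cons, List.find?_cons,
          show ((e.1, e.2.2.1).1 == num) = false from by simpa using he, cond_false]
        rw [ih h]; simp [fOf, he]

theorem getD_idxD_fst (m : List (Int × Int × Int × Int)) (i num : Int)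
    (h : num ∈ m.map (·.1)) : ((idxD m).getD num (0, 0)).1 = fOf m i num := by
  simp only [idxD, PySem.Dict.getD, PySem.Dict.get?, PySem.Dict.items]
  induction m with
  | nil => simp at h
  | cons e r ih =>
    by_cases he : e.1 = num
    · simp only [List.map_cons, List.find?_cons,
        show ((e.1, e.2.2).1 == num) = true from by simpa using he, cond_true]
      simp [fOf, he]
    · simp only [List.map_cons, List.mem_cons] at h
      rcases h with h | h
      · exact absurd h.symm he
      · simp only [List.map_cons, List.find?_cons,
          show ((e.1, e.2.2).1 == num) = false from by simpa using he, cond_false]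
        rw [ih h]; simp [fOf, he]

theorem map_replace_not_mem {ν : Type} (r : List (Int × Int × Int × Int)) (num : Int)
    (vf : Int × Int × Int × Int → ν) (X : Int × ν) (h : num ∉ r.map (·.1)) :
    r.map (fun e => if (e.1 == num) = true then X else (e.1, vf e)) =
      r.map (fun e => (e.1, vf e)) := by
  apply List.map_congr_left
  intro e he
  have : e.1 ≠ num := fun hn => h (hn ▸ List.mem_map_of_mem he)
  simp [this]

theorem insert_contains_true {ν : Type} (d : PySem.Dict Int ν) (k : Int) (v : ν)
    (h : d.contains k = true) :
    d.insert k v = PySem.Dict.mk (d.items.map fun p => if (p.1 == k) = true then (k, v) else p) := by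
  simp [PySem.Dict.insert, h]

theorem insert_contains_false {ν : Type} (d : PySem.Dict Int ν) (k : Int) (v : ν)
    (h : d.contains k = false) :
    d.insert k v = PySem.Dict.mk (d.items ++ [(k, v)]) := by
  simp [PySem.Dict.insert, h]

theorem map_upd_cnt (m : List (Int × Int × Int × Int)) (i num : Int)
    (hm : num ∈ m.map (·.1)) (hnd : (m.map (·.1)).Nodup) :
    m.map (fun e => if (e.1 == num) = true then (num, cOf m num + 1) else (e.1, e.2.1)) =
      (updM m i num).map (fun e => (e.1, e.2.1)) := by
  induction m with
  | nil => simp at hm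
  | cons e r ih =>
    by_cases h : e.1 = num
    · have hr : num ∉ r.map (·.1) := by
        simp only [List.map_cons, List.nodup_cons] at hnd
        exact h ▸ hnd.1
      simp only [List.map_cons, updM, if_pos h, cOf,
        show (e.1 == num) = true from by simpa using h, if_pos rfl, if_true]
      rw [map_replace_not_mem r num (fun e => e.2.1) _ hr]
    · simp only [List.map_cons, List.mem_cons] at hm
      rcases hm with hm | hm
      · exact absurd hm.symm h
      · simp only [List.map_cons, List.nodup_cons] at hnd
        simp only [List.map_cons, updM, if_neg h, cOf,
          show (e.1 == num) = false from by simpa using h, Bool.false_eq_true, if_false]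
        rw [ih hm hnd.2]

theorem map_upd_idx (m : List (Int × Int × Int × Int)) (i num : Int)
    (hm : num ∈ m.map (·.1)) (hnd : (m.map (·.1)).Nodup) :
    m.map (fun e => if (e.1 == num) = true then (num, (fOf m i num, i)) else (e.1, e.2.2)) =
      (updM m i num).map (fun e => (e.1, e.2.2)) := by
  induction m with
  | nil => simp at hm
  | cons e r ih =>
    by_cases h : e.1 = num
    · have hr : num ∉ r.map (·.1) := by
        simp only [List.map_cons, List.nodup_cons] at hnd
        exact h ▸ hnd.1
      simp only [List.map_cons, updM, if_pos h, fOf,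
        show (e.1 == num) = true from by simpa using h, if_pos rfl, if_true]
      rw [map_replace_not_mem r num (fun e => e.2.2) _ hr]
    · simp only [List.map_cons, List.mem_cons] at hm
      rcases hm with hm | hm
      · exact absurd hm.symm h
      · simp only [List.map_cons, List.nodup_cons] at hnd
        simp only [List.map_cons, updM, if_neg h, fOf,
          show (e.1 == num) = false from by simpa using h, Bool.false_eq_true, if_false]
        rw [ih hm hnd.2]

theorem cntD_insert (m : List (Int × Int × Int × Int)) (i num : Int)
    (hnd : (m.map (·.1)).Nodup) :
    (cntD m).insert num (cOf m num + 1) = cntD (updM m i num) := by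
  by_cases hm : num ∈ m.map (·.1)
  · have hc : (cntD m).contains num = true := by
      rw [show cntD m = PySem.Dict.mk (m.map fun e => (e.1, e.2.1)) from rfl,
        contains_mapD]; simpa using hm
    rw [insert_contains_true _ _ _ hc]
    show PySem.Dict.mk ((m.map fun e => (e.1, e.2.1)).map _) = _
    rw [List.map_map]
    exact congrArg PySem.Dict.mk (map_upd_cnt m i num hm hnd)
  · have hc : (cntD m).contains num = false := by
      rw [show cntD m = PySem.Dict.mk (m.map fun e => (e.1, e.2.1)) from rfl,
        contains_mapD]; simpa using hm
    rw [insert_contains_false _ _ _ hc]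
    show PySem.Dict.mk ((m.map fun e => (e.1, e.2.1)) ++ _) = _
    rw [updM_not_mem m i num hm, cOf_not_mem m num hm]
    simp [cntD]

theorem idxD_modify (m : List (Int × Int × Int × Int)) (i num : Int)
    (hm : num ∈ m.map (·.1)) (hnd : (m.map (·.1)).Nodup) :
    (idxD m).modify num (0, 0) (fun q => (q.1, i)) = idxD (updM m i num) := by
  have hc : (idxD m).contains num = true := by
    rw [show idxD m = PySem.Dict.mk (m.map fun e => (e.1, e.2.2)) from rfl,
      contains_mapD]; simpa using hm
  rw [PySem.Dict.modify, insert_contains_true _ _ _ hc]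
  show PySem.Dict.mk ((m.map fun e => (e.1, e.2.2)).map _) = _
  rw [List.map_map]
  have hg : ((idxD m).getD num (0, 0)).1 = fOf m i num := getD_idxD_fst m i num hm
  refine (congrArg PySem.Dict.mk (List.map_congr_left ?_)).trans
    (congrArg PySem.Dict.mk (map_upd_idx m i num hm hnd))
  intro e he
  by_cases h : (e.1 == num) = true
  · simp [Function.comp_apply, h, hg]
    intro hne; exact absurd (by simpa using h) hne
  · simp [Function.comp_apply, h]
    intro hEq; exact absurd hEq (by simpa using h)

theorem idxD_insert_new (m : List (Int × Int × Int × Int)) (i num : Int)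
    (hm : num ∉ m.map (·.1)) :
    (idxD m).insert num (i, i) = idxD (updM m i num) := by
  have hc : (idxD m).contains num = false := by
    rw [show idxD m = PySem.Dict.mk (m.map fun e => (e.1, e.2.2)) from rfl,
      contains_mapD]; simpa using hm
  rw [insert_contains_false _ _ _ hc]
  show PySem.Dict.mk ((m.map fun e => (e.1, e.2.2)) ++ _) = _
  rw [updM_not_mem m i num hm]
  simp [idxD]

theorem map_fst_updM (m : List (Int × Int × Int × Int)) (i num : Int)
    (hm : num ∈ m.map (·.1)) :
    (updM m i num).map (fun e => (e.1, e.2.2.1)) = m.map (fun e => (e.1, e.2.2.1)) := by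
  induction m with
  | nil => simp at hm
  | cons e r ih =>
    by_cases h : e.1 = num
    · simp [updM, if_pos h, h]
    · simp only [List.map_cons, List.mem_cons] at hm
      rcases hm with hm | hm
      · exact absurd hm.symm h
      · simp only [updM, if_neg h, List.map_cons]
        rw [ih hm]

theorem fstD_updM (m : List (Int × Int × Int × Int)) (i num : Int)
    (hm : num ∈ m.map (·.1)) : fstD (updM m i num) = fstD m := by
  unfold fstD
  exact congrArg PySem.Dict.mk (map_fst_updM m i num hm)

theorem fstD_insert_new (m : List (Int × Int × Int × Int)) (i num : Int)
    (hm : num ∉ m.map (·.1)) :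
    (fstD m).insert num i = fstD (updM m i num) := by
  have hc : (fstD m).contains num = false := by
    rw [show fstD m = PySem.Dict.mk (m.map fun e => (e.1, e.2.2.1)) from rfl,
      contains_mapD]; simpa using hm
  rw [insert_contains_false _ _ _ hc]
  show PySem.Dict.mk ((m.map fun e => (e.1, e.2.2.1)) ++ _) = _
  rw [updM_not_mem m i num hm]
  simp [fstD]

theorem fOf_updM (m : List (Int × Int × Int × Int)) (i j num : Int) :
    fOf (updM m i num) j num = fOf m i num := by
  induction m with
  | nil => simp [updM, fOf]
  | cons e r ih =>
    by_cases h : e.1 = num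
    · simp [updM, if_pos h, fOf]
    · simp [updM, if_neg h, fOf, if_neg h, ih]

theorem mem_keys_updM (m : List (Int × Int × Int × Int)) (i num : Int) :
    num ∈ (updM m i num).map (·.1) := by
  rw [keys_updM]
  split
  · assumption
  · simp

def spans (m : List (Int × Int × Int × Int)) (d : Int) : List Int :=
  (m.filter fun e => e.2.1 == d).map fun e => e.2.2.2 - e.2.2.1 + 1
def ansM (m : List (Int × Int × Int × Int)) : Int := minWith (spans m (degM m))
def model (l : List (Int × Int)) (m : List (Int × Int × Int × Int)) :
    List (Int × Int × Int × Int) :=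
  l.foldl (fun m p => updM m p.1 p.2) m

theorem spans_ne_nil (m : List (Int × Int × Int × Int)) (hm : m ≠ [])
    (hc : ∀ e ∈ m, 1 ≤ e.2.1) : spans m (degM m) ≠ [] := by
  obtain ⟨e, he, hd⟩ := degM_mem m hm hc
  have : e ∈ m.filter (fun e => e.2.1 == degM m) :=
    List.mem_filter.mpr ⟨he, by simpa using hd⟩
  simp only [spans, ne_eq, List.map_eq_nil_iff]
  exact fun h => by simp [h] at this

theorem ansM_updM (m : List (Int × Int × Int × Int)) (s num : Int) (hg : Good m s) :
    ansM (updM m s num) =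
      (if degM m < cOf m num + 1 then s - fOf m s num + 1
       else if cOf m num + 1 = degM m then min (ansM m) (s - fOf m s num + 1)
       else ansM m) := by
  obtain ⟨hnd, hs, hb⟩ := hg
  by_cases h1 : degM m < cOf m num + 1
  · rw [if_pos h1]
    have hdeg : degM (updM m s num) = cOf m num + 1 := by
      rw [degM_updM]; omega
    have hnil : m.filter (fun e => e.2.1 == cOf m num + 1) = [] := by
      apply List.filter_eq_nil_iff.mpr
      intro e he
      have := le_degM m e he
      simp only [beq_iff_eq]; omega
    obtain ⟨l1, l2, hf1, hf2⟩ := filter_updM_insert m s num (cOf m num + 1) rfl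
    rw [hnil] at hf1
    obtain ⟨h1', h2'⟩ := List.append_eq_nil_iff.mp hf1.symm
    subst h1'; subst h2'
    simp only [ansM, spans, hdeg, hf2]
    simp [minWith]
  · rw [if_neg h1]
    by_cases h2 : cOf m num + 1 = degM m
    · rw [if_pos h2]
      have hdeg : degM (updM m s num) = degM m := by rw [degM_updM]; omega
      have hmne : m ≠ [] := by
        intro h; subst h
        simp [degM, cOf] at h2
      obtain ⟨l1, l2, hf1, hf2⟩ := filter_updM_insert m s num (degM m) h2.symm
      have hsp : spans (updM m s num) (degM m) =
          (l1.map fun e => e.2.2.2 - e.2.2.1 + 1) ++ (s - fOf m s num + 1) ::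
            (l2.map fun e => e.2.2.2 - e.2.2.1 + 1) := by
        simp [spans, hf2]
      have hsp0 : spans m (degM m) =
          (l1.map fun e => e.2.2.2 - e.2.2.1 + 1) ++ (l2.map fun e => e.2.2.2 - e.2.2.1 + 1) := by
        simp [spans, hf1]
      have hne : (l1.map fun e => e.2.2.2 - e.2.2.1 + 1) ++ (l2.map fun e => e.2.2.2 - e.2.2.1 + 1) ≠ [] := by
        rw [← hsp0]
        exact spans_ne_nil m hmne (fun e he => (hb e he).1)
      simp only [ansM, hdeg, hsp, hsp0]
      rw [minWith_insert _ _ _ hne]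
    · rw [if_neg h2]
      have hdeg : degM (updM m s num) = degM m := by rw [degM_updM]; omega
      have hf := filter_updM_ne m s num (degM m) h2 (by omega)
      simp only [ansM, hdeg, spans, hf]

theorem stepA (m : List (Int × Int × Int × Int)) (i num : Int)
    (hnd : (m.map (·.1)).Nodup) :
    aStep (cntD m, idxD m) (i, num) = (cntD (updM m i num), idxD (updM m i num)) := by
  show (if (cntD m).contains num = false then
        ((cntD m).insert num 1, (idxD m).insert num (i, i))
      else
        ((cntD m).modify num 0 (· + 1), (idxD m).modify num (0, 0) (fun q => (q.1, i)))) =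
      (cntD (updM m i num), idxD (updM m i num))
  by_cases hm : num ∈ m.map (·.1)
  · have hc : (cntD m).contains num = true := by
      rw [show cntD m = PySem.Dict.mk (m.map fun e => (e.1, e.2.1)) from rfl,
        contains_mapD]; simpa using hm
    rw [hc, if_neg (by simp)]
    rw [PySem.Dict.modify, getD_cntD, cntD_insert m i num hnd, idxD_modify m i num hm hnd]
  · have hc : (cntD m).contains num = false := by
      rw [show cntD m = PySem.Dict.mk (m.map fun e => (e.1, e.2.1)) from rfl,
        contains_mapD]; simpa using hm
    rw [hc, if_pos rfl]
    have h1 : (cntD m).insert num 1 = cntD (updM m i num) := by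
      have := cntD_insert m i num hnd
      rwa [cOf_not_mem m num hm, zero_add] at this
    rw [h1, idxD_insert_new m i num hm]

theorem stepB (m : List (Int × Int × Int × Int)) (s num : Int) (hg : Good m s) :
    bStep (fstD m, cntD m, degM m, ansM m) (s, num) =
      (fstD (updM m s num), cntD (updM m s num), degM (updM m s num), ansM (updM m s num)) := by
  unfold bStep
  obtain ⟨hnd, hs, hb⟩ := hg
  have hfirst : (if (fstD m).contains num = false then (fstD m).insert num s else fstD m) =
      fstD (updM m s num) := by
    by_cases hm : num ∈ m.map (·.1)
    · rw [show fstD m = PySem.Dict.mk (m.map fun e => (e.1, e.2.2.1)) from rfl,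
        contains_mapD, if_neg (by simpa using hm)]
      exact (fstD_updM m s num hm).symm
    · rw [show fstD m = PySem.Dict.mk (m.map fun e => (e.1, e.2.2.1)) from rfl,
        contains_mapD, if_pos (by simpa using hm)]
      exact fstD_insert_new m s num hm
  have hlook : (fstD (updM m s num)).getD num 0 = fOf m s num := by
    rw [getD_fstD_fOf (updM m s num) 0 num (mem_keys_updM m s num), fOf_updM]
  have hcnt : (cntD m).insert num ((cntD m).getD num 0 + 1) = cntD (updM m s num) := by
    rw [getD_cntD, cntD_insert m s num hnd]
  have hcnt2 : (cntD m).insert num (cOf m num + 1) = cntD (updM m s num) :=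
    cntD_insert m s num hnd
  simp only [hfirst, getD_cntD, hcnt2, hlook]
  rw [degM_updM, ansM_updM m s num ⟨hnd, hs, hb⟩]
  split_ifs with h1 h2
  · simp [show max (degM m) (cOf m num + 1) = cOf m num + 1 by omega]
  · simp [show max (degM m) (cOf m num + 1) = degM m by omega]
  · simp [show max (degM m) (cOf m num + 1) = degM m by omega]

theorem foldA (xs : List Int) : ∀ (s : Int) (m : List (Int × Int × Int × Int)), Good m s →
    (PySem.List.enumerate xs s).foldl aStep (cntD m, idxD m) =
      (cntD (model (PySem.List.enumerate xs s) m), idxD (model (PySem.List.enumerate xs s) m)) := by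
  induction xs with
  | nil => intro s m hg; simp [PySem.List.enumerate, model]
  | cons x t ih =>
    intro s m hg
    rw [PySem.List.enumerate_cons, List.foldl_cons, stepA m s x hg.1]
    have hmod : model ((s, x) :: PySem.List.enumerate t (s + 1)) m =
        model (PySem.List.enumerate t (s + 1)) (updM m s x) := rfl
    rw [hmod]
    exact ih (s + 1) (updM m s x) (good_updM m s x hg)

theorem foldB (xs : List Int) : ∀ (s : Int) (m : List (Int × Int × Int × Int)), Good m s →
    (PySem.List.enumerate xs s).foldl bStep (fstD m, cntD m, degM m, ansM m) =
      (fstD (model (PySem.List.enumerate xs s) m),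
       cntD (model (PySem.List.enumerate xs s) m),
       degM (model (PySem.List.enumerate xs s) m),
       ansM (model (PySem.List.enumerate xs s) m)) := by
  induction xs with
  | nil => intro s m hg; simp [PySem.List.enumerate, model]
  | cons x t ih =>
    intro s m hg
    rw [PySem.List.enumerate_cons, List.foldl_cons, stepB m s x hg]
    have hmod : model ((s, x) :: PySem.List.enumerate t (s + 1)) m =
        model (PySem.List.enumerate t (s + 1)) (updM m s x) := rfl
    rw [hmod]
    exact ih (s + 1) (updM m s x) (good_updM m s x hg)

theorem good_model (xs : List Int) : ∀ (s : Int) (m : List (Int × Int × Int × Int)),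
    Good m s → Good (model (PySem.List.enumerate xs s) m) (s + xs.length) := by
  induction xs with
  | nil => intro s m hg; simpa [PySem.List.enumerate, model] using hg
  | cons x t ih =>
    intro s m hg
    rw [PySem.List.enumerate_cons]
    have hmod : model ((s, x) :: PySem.List.enumerate t (s + 1)) m =
        model (PySem.List.enumerate t (s + 1)) (updM m s x) := rfl
    rw [hmod, show (s + ↑(x :: t).length : Int) = (s + 1) + ↑t.length by simp; push_cast; ring]
    exact ih (s + 1) (updM m s x) (good_updM m s x hg)

theorem updM_ne_nil (m : List (Int × Int × Int × Int)) (i num : Int) :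
    updM m i num ≠ [] := by
  cases m with
  | nil => simp [updM]
  | cons e r => by_cases h : e.1 = num <;> simp [updM, h]

theorem model_ne_nil (xs : List Int) : ∀ (s : Int) (m : List (Int × Int × Int × Int)),
    (xs ≠ [] ∨ m ≠ []) → model (PySem.List.enumerate xs s) m ≠ [] := by
  induction xs with
  | nil =>
    intro s m h
    simp [PySem.List.enumerate, model]
    tauto
  | cons x t ih =>
    intro s m _
    rw [PySem.List.enumerate_cons]
    simp only [model, List.foldl_cons]
    exact ih (s + 1) (updM m s x) (Or.inr (updM_ne_nil m s x))

theorem getD_idxD (m : List (Int × Int × Int × Int)) (hnd : (m.map (·.1)).Nodup) :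
    ∀ e ∈ m, (idxD m).getD e.1 (0, 0) = e.2.2 := by
  induction m with
  | nil => simp
  | cons a r ih =>
    intro e he
    simp only [idxD, PySem.Dict.getD, PySem.Dict.get?, PySem.Dict.items, List.map_cons]
    rcases List.mem_cons.mp he with h | h
    · subst h
      simp [List.find?_cons]
    · have ha : a.1 ≠ e.1 := by
        simp only [List.map_cons, List.nodup_cons] at hnd
        exact fun hae => hnd.1 (hae ▸ List.mem_map_of_mem h)
      rw [List.find?_cons, show ((a.1, a.2.2).1 == e.1) = false from by simpa using ha]
      simp only [cond_false]
      have := ih (by simp only [List.map_cons, List.nodup_cons] at hnd; exact hnd.2) e h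
      simpa [idxD, PySem.Dict.getD, PySem.Dict.get?] using this
theorem finalA (m : List (Int × Int × Int × Int)) (n : Int) (hg : Good m n) (hne : m ≠ [])
    (hn : ∀ e ∈ m, e.2.2.2 < n) :
    (match PySem.List.max? (cntD m).values (fun v => v) with
     | none => (0 : Int)
     | some deg =>
       (((cntD m).items.filter (fun kv => kv.2 == deg)).map (fun kv => kv.1)).foldl
         (fun ln key =>
           min ln (((idxD m).getD key (0, 0)).2 - ((idxD m).getD key (0, 0)).1 + 1)) n)
    = ansM m := by
  obtain ⟨hnd, hs, hb⟩ := hg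
  cases m with
  | nil => exact absurd rfl hne
  | cons e0 rest =>
    have hval : (cntD (e0 :: rest)).values = e0.2.1 :: rest.map (fun e => e.2.1) := by
      simp [cntD, PySem.Dict.values]
    rw [hval, PySem.List.max?_id_cons]
    have hdeg : (rest.map (fun e => e.2.1)).foldl max e0.2.1 = degM (e0 :: rest) := by
      have h1 := (hb e0 (by simp)).1
      simp only [degM, List.map_cons, List.foldl_cons]
      rw [show max (0 : Int) e0.2.1 = e0.2.1 by omega]
    simp only [hdeg]
    -- keys of the filtered entries, then fold over the entries themselves
    have hitems : (cntD (e0 :: rest)).items = (e0 :: rest).map (fun e => (e.1, e.2.1)) := rfl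
    rw [hitems, List.filter_map, List.map_map, List.foldl_map]
    have hcong : ((e0 :: rest).filter ((fun kv => kv.2 == degM (e0 :: rest)) ∘ fun e => (e.1, e.2.1))).foldl
        (fun ln e => min ln (((idxD (e0 :: rest)).getD ((Prod.fst ∘ fun e => (e.1, e.2.1)) e) (0, 0)).2 -
          ((idxD (e0 :: rest)).getD ((Prod.fst ∘ fun e => (e.1, e.2.1)) e) (0, 0)).1 + 1)) n =
        ((e0 :: rest).filter ((fun kv => kv.2 == degM (e0 :: rest)) ∘ fun e => (e.1, e.2.1))).foldl
        (fun ln e => min ln (e.2.2.2 - e.2.2.1 + 1)) n := by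
      apply PySem.List.foldl_congr_mem
      intro acc e he
      have hem : e ∈ e0 :: rest := (List.mem_filter.mp he).1
      rw [show (Prod.fst ∘ fun e => (e.1, e.2.1)) e = e.1 from rfl, getD_idxD _ hnd e hem]
    rw [hcong]
    have hfilt : ((e0 :: rest).filter ((fun kv => kv.2 == degM (e0 :: rest)) ∘ fun e => (e.1, e.2.1))) =
        ((e0 :: rest).filter (fun e => e.2.1 == degM (e0 :: rest))) := by
      apply List.filter_congr; intro e _; rfl
    rw [hfilt]
    have hfold : ((e0 :: rest).filter (fun e => e.2.1 == degM (e0 :: rest))).foldl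
        (fun ln e => min ln (e.2.2.2 - e.2.2.1 + 1)) n =
        (spans (e0 :: rest) (degM (e0 :: rest))).foldl min n := by
      simp only [spans, List.foldl_map]
    rw [hfold]
    have hsne : spans (e0 :: rest) (degM (e0 :: rest)) ≠ [] :=
      spans_ne_nil _ hne (fun e he => (hb e he).1)
    obtain ⟨x, t, hxt⟩ : ∃ x t, spans (e0 :: rest) (degM (e0 :: rest)) = x :: t := by
      cases hsp : spans (e0 :: rest) (degM (e0 :: rest)) with
      | nil => exact absurd hsp hsne
      | cons x t => exact ⟨x, t, rfl⟩
    -- the head span is the span of some entry, hence ≤ n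
    have hxle : x ≤ n := by
      have hx : x ∈ spans (e0 :: rest) (degM (e0 :: rest)) := by rw [hxt]; simp
      simp only [spans, List.mem_map] at hx
      obtain ⟨e, he, hex⟩ := hx
      have hem : e ∈ e0 :: rest := (List.mem_filter.mp he).1
      have := hb e hem
      have := hn e hem
      omega
    rw [hxt, List.foldl_cons, show min n x = min x n by omega, foldl_min_acc]
    have hminle : t.foldl min x ≤ x := (PySem.List.foldl_min_le t x).1
    rw [show min (t.foldl min x) n = t.foldl min x by omega]
    simp only [ansM, hxt, minWith]

theorem equivMain (nums : List Int) (h : nums ≠ []) :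
    findShortestSubArray nums = findShortestSubArray_alt nums := by
  have hg0 : Good [] 0 := ⟨by simp, le_refl 0, by simp⟩
  have hA := foldA nums 0 [] hg0
  have hB := foldB nums 0 [] hg0
  have hGood : Good (model (PySem.List.enumerate nums 0) []) ((nums.length : Int)) := by
    have := good_model nums 0 [] hg0
    rwa [zero_add] at this
  have hne : model (PySem.List.enumerate nums 0) [] ≠ [] :=
    model_ne_nil nums 0 [] (Or.inl h)
  unfold findShortestSubArray findShortestSubArray_alt
  rw [show ((PySem.Dict.empty : PySem.Dict Int Int), (PySem.Dict.empty : PySem.Dict Int (Int × Int))) = ((cntD []), (idxD [])) from rfl, hA]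
  rw [show ((PySem.Dict.empty : PySem.Dict Int Int), (PySem.Dict.empty : PySem.Dict Int Int), (0:Int), (0:Int)) = ((fstD []), (cntD []), degM [], ansM []) from rfl, hB]
  exact finalA (model (PySem.List.enumerate nums 0) []) (nums.length : Int) hGood hne
    (fun e he => (hGood.2.2 e he).2.2.2)

-- ===== VERDICT (by name: the statement is the Claim_ definition above) =====
theorem findShortestSubArray_spec : Claim_equal_findShortestSubArray := by
  intro nums _ hpre
  unfold Spec_findShortestSubArray
  exact (equivMain nums hpre).symm ▸ rfl
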